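-- pv_equiv track=rewrite | github.com/pypi-data/pypi-mirror-236 | packages/ezptn/ezptn-0.0.1.tar.gz/ezptn-0.0.1/ezptn/__init__.py | fix_filter
-- ===== SOURCE A (Python) =====
-- def fix_filter(raw_res, head_fix, tail_fix):
-- 	ret_ls = []
-- 	for e in raw_res:
-- 		if head_fix is True:
-- 			if e[0] != "": continue
-- 			e = e[1:]
-- 		if tail_fix is True:
-- 			if e[-1] != "": continue
-- 			e = e[:-1]
-- 		ret_ls.append(e)
-- 	return ret_ls
-- ===== SOURCE B (Python) =====
-- def fix_filter(raw_res, head_fix, tail_fix):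
-- 	def trim_pass(ls, pos):
-- 		out = []
-- 		for e in ls:
-- 			if e[pos] == "":
-- 				out.append(e[1:] if pos == 0 else e[:-1])
-- 		return out
-- 	mid = trim_pass(raw_res, 0) if head_fix is True else list(raw_res)
-- 	return trim_pass(mid, -1) if tail_fix is True else mid
-- ===== Notes on version B (the rewrite author's own statement) =====
-- stated objective: alternative
-- what changed: A's single fused loop that rebinds e (trim head, re-check the trimmed tail, append) is decomposed into two staged passes of one shared parametrized helper: a head pass over raw_res, then a tail pass over its intermediate result, each run only when its flag is True.
import Mathlib
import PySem

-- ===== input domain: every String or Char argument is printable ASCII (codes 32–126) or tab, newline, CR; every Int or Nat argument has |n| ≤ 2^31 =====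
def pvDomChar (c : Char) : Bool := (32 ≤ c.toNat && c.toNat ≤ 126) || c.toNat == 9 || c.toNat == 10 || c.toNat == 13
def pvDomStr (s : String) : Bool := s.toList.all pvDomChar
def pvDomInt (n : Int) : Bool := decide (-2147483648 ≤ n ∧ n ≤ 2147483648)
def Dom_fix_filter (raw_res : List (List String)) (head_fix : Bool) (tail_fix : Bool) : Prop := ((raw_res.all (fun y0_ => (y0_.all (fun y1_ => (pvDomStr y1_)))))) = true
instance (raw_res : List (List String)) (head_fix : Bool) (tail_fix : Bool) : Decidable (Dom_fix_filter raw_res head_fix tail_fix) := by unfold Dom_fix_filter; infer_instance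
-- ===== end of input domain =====

-- B decomposes A's fused loop into two staged passes of one shared parametrized helper
-- (trim the flagged end per pass); objective: simpler, same cost.

-- ===== PORT A =====
-- A's loop body after the head_fix block (shared by both branches, since in Python the
-- head_fix block just rebinds e): the tail_fix check and the append.
def fixFilterTail (tail_fix : Bool) (ret_ls : List (List String)) (e : List String) :
    List (List String) :=
  if tail_fix = true then
    if PySem.List.pyGetD e (-1) "" ≠ "" then ret_ls          -- e[-1]: raises on e = [] (excluded by Pre_)
    else ret_ls ++ [PySem.List.slice e none (some (-1))]      -- e[:-1]
  else ret_ls ++ [e]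

def fix_filter (raw_res : List (List String)) (head_fix : Bool) (tail_fix : Bool) : List (List String) :=
  raw_res.foldl (fun ret_ls e =>
    if head_fix = true then
      if PySem.List.pyGetD e 0 "" ≠ "" then ret_ls            -- e[0]: raises on e = [] (excluded by Pre_)
      else fixFilterTail tail_fix ret_ls (PySem.List.slice e (some 1) none)  -- e = e[1:]
    else fixFilterTail tail_fix ret_ls e) []

-- ===== PORT B =====
-- Source B's shared helper: one pass that keeps elements whose end at `pos` is "" and trims that end
def trimPass (ls : List (List String)) (pos : Int) : List (List String) :=
  ls.foldl (fun out e =>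
    if PySem.List.pyGetD e pos "" == "" then                  -- e[pos]: raises on e = [] (excluded by Pre_)
      out ++ [if pos == 0 then PySem.List.slice e (some 1) none
              else PySem.List.slice e none (some (-1))]
    else out) []

def fix_filter_alt (raw_res : List (List String)) (head_fix : Bool) (tail_fix : Bool) : List (List String) :=
  let mid := if head_fix = true then trimPass raw_res 0 else raw_res
  if tail_fix = true then trimPass mid (-1) else mid

-- ===== PRECONDITION & SPEC =====
-- Pre_ excludes exactly the inputs where A raises IndexError: an empty element when a flag
-- demands indexing it, and the element [""] when both flags hold (its head-trimmed rest is empty).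
def Pre_fix_filter (raw_res : List (List String)) (head_fix : Bool) (tail_fix : Bool) : Prop :=
  ∀ e ∈ raw_res,
    (head_fix = true → e ≠ []) ∧
    (head_fix = true → tail_fix = true → e ≠ [""]) ∧
    (head_fix = false → tail_fix = true → e ≠ [])
instance (raw_res : List (List String)) (head_fix : Bool) (tail_fix : Bool) : Decidable (Pre_fix_filter raw_res head_fix tail_fix) := by unfold Pre_fix_filter; infer_instance
def pvWitness_fix_filter : List (List String) × Bool × Bool := ([["", "ab", ""], ["x", "y"], []], false, false)

def Spec_fix_filter (raw_res : List (List String)) (head_fix : Bool) (tail_fix : Bool) (out : List (List String)) : Prop := out = fix_filter_alt raw_res head_fix tail_fix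
instance (raw_res : List (List String)) (head_fix : Bool) (tail_fix : Bool) (out : List (List String)) : Decidable (Spec_fix_filter raw_res head_fix tail_fix out) := by unfold Spec_fix_filter; infer_instance

-- ===== CLAIM (what is proved, stated in full; the proofs are below) =====
def Claim_equal_fix_filter : Prop := ∀ (raw_res : List (List String)) (head_fix : Bool) (tail_fix : Bool), Dom_fix_filter raw_res head_fix tail_fix → Pre_fix_filter raw_res head_fix tail_fix → Spec_fix_filter raw_res head_fix tail_fix (fix_filter raw_res head_fix tail_fix)

-- ===== LEMMAS AND PROOFS =====

-- closed form of B's helper pass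
lemma trimPass_eq (ls : List (List String)) (pos : Int) :
    trimPass ls pos
      = (ls.filter (fun e => PySem.List.pyGetD e pos "" == "")).map
          (fun e => if pos == 0 then PySem.List.slice e (some 1) none
                    else PySem.List.slice e none (some (-1))) := by
  unfold trimPass
  exact PySem.List.foldl_append_if _ _ ls []

-- the TT case: A's fused loop computes B's two staged passes
lemma fused_TT (ls : List (List String)) : ∀ (acc : List (List String)),
    ls.foldl (fun ret_ls e =>
      if PySem.List.pyGetD e 0 "" ≠ "" then ret_ls
      else fixFilterTail true ret_ls (PySem.List.slice e (some 1) none)) acc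
    = acc ++ trimPass (trimPass ls 0) (-1) := by
  induction ls with
  | nil => intro acc; simp [trimPass]
  | cons e rest ih =>
    intro acc
    rw [List.foldl_cons, ih]
    simp only [trimPass_eq, List.filter_cons]
    by_cases h0 : PySem.List.pyGetD e 0 "" = ""
    · by_cases h1 :
        PySem.List.pyGetD (PySem.List.slice e (some 1) none) (-1) "" = ""
      · simp [fixFilterTail, h0, h1]
      · simp [fixFilterTail, h0, h1]
    · simp [h0]

-- ===== VERDICT (by name: the statement is the Claim_ definition above) =====
theorem fix_filter_spec : Claim_equal_fix_filter := by
  intro raw_res head_fix tail_fix _ _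
  unfold Spec_fix_filter fix_filter fix_filter_alt
  cases head_fix <;> cases tail_fix
  · -- F F: A appends every element; B returns the list unchanged
    show List.foldl (fun ret_ls e => fixFilterTail false ret_ls e) [] raw_res = raw_res
    simpa [fixFilterTail] using PySem.List.foldl_append_singleton raw_res []
  · -- F T: one tail pass on both sides
    show List.foldl (fun ret_ls e => fixFilterTail true ret_ls e) [] raw_res
        = trimPass raw_res (-1)
    rw [show (fun (ret_ls : List (List String)) e => fixFilterTail true ret_ls e)
          = (fun out e =>
              if PySem.List.pyGetD e (-1) "" == "" then
                out ++ [if (-1 : Int) == 0 then PySem.List.slice e (some 1) none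
                        else PySem.List.slice e none (some (-1))]
              else out) by
        funext acc e
        by_cases h : PySem.List.pyGetD e (-1) "" = "" <;> simp [fixFilterTail, h]]
    rfl
  · -- T F: one head pass on both sides
    show List.foldl (fun ret_ls e =>
          if PySem.List.pyGetD e 0 "" ≠ "" then ret_ls
          else fixFilterTail false ret_ls (PySem.List.slice e (some 1) none)) [] raw_res
        = trimPass raw_res 0
    rw [show (fun (ret_ls : List (List String)) e =>
          if PySem.List.pyGetD e 0 "" ≠ "" then ret_ls
          else fixFilterTail false ret_ls (PySem.List.slice e (some 1) none))
          = (fun out e =>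
              if PySem.List.pyGetD e 0 "" == "" then
                out ++ [if (0 : Int) == 0 then PySem.List.slice e (some 1) none
                        else PySem.List.slice e none (some (-1))]
              else out) by
        funext acc e
        by_cases h : PySem.List.pyGetD e 0 "" = "" <;> simp [fixFilterTail, h]]
    rfl
  · -- T T: the fused loop is the composition of the two passes
    show List.foldl (fun ret_ls e =>
          if PySem.List.pyGetD e 0 "" ≠ "" then ret_ls
          else fixFilterTail true ret_ls (PySem.List.slice e (some 1) none)) [] raw_res
        = trimPass (trimPass raw_res 0) (-1)
    simpa using fused_TT raw_res []
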